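-- pv_equiv track=rewrite | github.com/innovat31/IITM-BS--Grpa | Week-7/Data_Processing-3_Function_Type.py | longest_antakshari_subsequence
-- ===== SOURCE A (Python) =====
-- def longest_antakshari_subsequence(words):
--     max_length = 0
--     current_length = 1
--
--     for i in range(len(words) - 1):
--         if words[i][-1] == words[i + 1][0]:  # Check if last letter matches first letter
--             current_length += 1
--         else:
--             max_length = max(max_length, current_length)
--             current_length = 1  # Reset length for next possible sequence
--
--     max_length = max(max_length, current_length)  # Final check
--     return max_length
-- ===== SOURCE B (Python) =====
-- def longest_antakshari_subsequence(words):
--     flags = [a[-1] == b[0] for a, b in zip(words, words[1:])]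
--     breaks = [-1] + [i for i, f in enumerate(flags) if not f] + [len(flags)]
--     return max(b - a for a, b in zip(breaks, breaks[1:]))
-- ===== Notes on version B (the rewrite author's own statement) =====
-- stated objective: alternative
-- what changed: Replaces the online run-tracking loop with reset by a precompute-then-scan decomposition: build the adjacent-link flag list, collect the positions of the broken links, and return the largest gap between consecutive break positions (sentinels -1 and len(flags)).
import Mathlib
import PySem

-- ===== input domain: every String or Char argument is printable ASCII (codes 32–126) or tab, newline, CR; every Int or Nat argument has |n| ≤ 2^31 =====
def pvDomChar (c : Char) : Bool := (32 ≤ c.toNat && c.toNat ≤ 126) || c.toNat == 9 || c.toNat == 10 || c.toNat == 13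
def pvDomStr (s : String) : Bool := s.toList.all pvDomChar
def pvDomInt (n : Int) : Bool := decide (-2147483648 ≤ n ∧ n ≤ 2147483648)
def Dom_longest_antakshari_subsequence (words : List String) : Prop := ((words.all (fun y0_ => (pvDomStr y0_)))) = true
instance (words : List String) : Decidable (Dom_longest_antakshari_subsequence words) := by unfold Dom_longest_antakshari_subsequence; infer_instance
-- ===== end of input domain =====

-- B replaces A's online run-tracking loop (with resets) by a precompute-then-scan decomposition:
-- flag list of adjacent links, then the largest gap between consecutive break positions.

-- ===== PORT A =====
-- literal port of A: fold over range(len(words)-1) carrying (max_length, current_length)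
def longest_antakshari_subsequence (words : List String) : Int :=
  let st := (PySem.List.pyRange 0 ((words.length : Int) - 1) 1).foldl
    (fun (st : Int × Int) i =>
      if PySem.List.pyGetD (PySem.List.pyGetD words i "").toList (-1) ' '
         = PySem.List.pyGetD (PySem.List.pyGetD words (i + 1) "").toList 0 ' '
      then (st.1, st.2 + 1)
      else (max st.1 st.2, 1))
    ((0 : Int), (1 : Int))
  max st.1 st.2

-- ===== PORT B =====
-- literal port of Source B: flags, break positions with sentinels, max gap
def longest_antakshari_subsequence_alt (words : List String) : Int :=
  let flags : List Bool :=
    (words.zip (PySem.List.slice words (some 1) none)).map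
      (fun p => PySem.List.pyGetD p.1.toList (-1) ' ' == PySem.List.pyGetD p.2.toList 0 ' ')
  let breaks : List Int :=
    [-1] ++ (((PySem.List.enumerate flags).filter (fun q => !q.2)).map (·.1))
         ++ [(flags.length : Int)]
  match (breaks.zip breaks.tail).map (fun p => p.2 - p.1) with
  | [] => 0        -- unreachable: breaks always has ≥ 2 elements (Python's max would raise on [])
  | d :: ds => ds.foldl max d

-- ===== PRECONDITION & SPEC =====
-- Pre_ excludes inputs where Python A raises IndexError: a list of ≥ 2 words containing an empty word
-- (words[i][-1] / words[i+1][0] fails there); B's Python raises there too.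
def Pre_longest_antakshari_subsequence (words : List String) : Prop :=
  words.length ≤ 1 ∨ ∀ w ∈ words, w ≠ ""
instance (words : List String) : Decidable (Pre_longest_antakshari_subsequence words) := by
  unfold Pre_longest_antakshari_subsequence; infer_instance

def pvWitness_longest_antakshari_subsequence : List String := ["ab", "ba", "cd"]

def Spec_longest_antakshari_subsequence (words : List String) (out : Int) : Prop := out = longest_antakshari_subsequence_alt words
instance (words : List String) (out : Int) : Decidable (Spec_longest_antakshari_subsequence words out) := by unfold Spec_longest_antakshari_subsequence; infer_instance

-- ===== CLAIM (what is proved, stated in full; the proofs are below) =====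
def Claim_equal_longest_antakshari_subsequence : Prop := ∀ (words : List String), Dom_longest_antakshari_subsequence words → Pre_longest_antakshari_subsequence words → Spec_longest_antakshari_subsequence words (longest_antakshari_subsequence words)

-- ===== LEMMAS AND PROOFS =====

-- the step function of A's fold, abstracted over the link flag
def pvStep (st : Int × Int) (b : Bool) : Int × Int :=
  if b then (st.1, st.2 + 1) else (max st.1 st.2, 1)

-- common specification: best chain length over the flag list, the first run seeded with c
def pvAns : List Bool → Int → Int
  | [], c => c
  | true :: fs, c => pvAns fs (c + 1)
  | false :: fs, c => max c (pvAns fs 1)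

theorem pvAns_pos : ∀ (fs : List Bool) (c : Int), 0 < c → 0 < pvAns fs c := by
  intro fs
  induction fs with
  | nil => intro c hc; exact hc
  | cons b fs ih =>
    intro c hc
    cases b with
    | true => exact ih (c + 1) (by omega)
    | false =>
      have := ih 1 (by omega)
      simp only [pvAns]
      omega

theorem pvA_foldl (fs : List Bool) : ∀ (m c : Int),
    max (fs.foldl pvStep (m, c)).1 (fs.foldl pvStep (m, c)).2 = max m (pvAns fs c) := by
  induction fs with
  | nil => intro m c; simp [pvAns]
  | cons b fs ih =>
    intro m c
    cases b with
    | true => simpa [pvStep, pvAns] using ih m (c + 1)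
    | false =>
      have h := ih (max m c) 1
      simp only [List.foldl_cons, pvStep, Bool.false_eq_true, if_false, pvAns]
      rw [h]
      omega

-- Python's max over a nonempty list, as Source B's port computes it
def pvMx : List Int → Int
  | [] => 0
  | d :: ds => ds.foldl max d

theorem pv_foldl_max (t : List Int) : ∀ (a b : Int), t.foldl max (max a b) = max a (t.foldl max b) := by
  induction t with
  | nil => intro a b; simp
  | cons x t ih =>
    intro a b
    simp only [List.foldl_cons]
    rw [show max (max a b) x = max a (max b x) by omega, ih]

theorem pvMx_cons (d e : Int) (t : List Int) : pvMx (d :: e :: t) = max d (pvMx (e :: t)) := by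
  simp only [pvMx, List.foldl_cons]
  exact pv_foldl_max t d e

-- break positions: indices of false flags starting at offset s
def pvPos : List Bool → Int → List Int
  | [], _ => []
  | b :: fs, s => (if !b then [s] else []) ++ pvPos fs (s + 1)

def pvGaps (l : List Int) : List Int := (l.zip l.tail).map (fun p => p.2 - p.1)

theorem pvPos_eq (fs : List Bool) : ∀ (s : Int),
    ((PySem.List.enumerate fs s).filter (fun q => !q.2)).map (·.1) = pvPos fs s := by
  induction fs with
  | nil => intro s; simp [PySem.List.enumerate_nil, pvPos]
  | cons b fs ih =>
    intro s
    rw [PySem.List.enumerate_cons]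
    cases b with
    | true => simpa [pvPos] using ih (s + 1)
    | false => simpa [pvPos] using ih (s + 1)

theorem pvB_gaps (fs : List Bool) : ∀ (s prev : Int),
    pvMx (pvGaps (prev :: (pvPos fs s ++ [s + (fs.length : Int)]))) = pvAns fs (s - prev) := by
  induction fs with
  | nil => intro s prev; simp [pvPos, pvGaps, pvMx, pvAns]
  | cons b fs ih =>
    intro s prev
    cases b with
    | true =>
      simp only [pvPos, Bool.not_true, Bool.false_eq_true, if_false, List.nil_append,
        List.length_cons]
      rw [show ((fs.length + 1 : Nat) : Int) = (fs.length : Int) + 1 by push_cast; ring,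
        show s + ((fs.length : Int) + 1) = (s + 1) + (fs.length : Int) by ring,
        ih (s + 1) prev]
      simp only [pvAns]
      congr 1
      ring
    | false =>
      simp only [pvPos, Bool.not_false, if_true, List.cons_append, List.length_cons]
      rw [show ((fs.length + 1 : Nat) : Int) = (fs.length : Int) + 1 by push_cast; ring,
        show s + ((fs.length : Int) + 1) = (s + 1) + (fs.length : Int) by ring]
      have hg : pvGaps (prev :: s :: (pvPos fs (s + 1) ++ [(s + 1) + (fs.length : Int)]))
          = (s - prev) :: pvGaps (s :: (pvPos fs (s + 1) ++ [(s + 1) + (fs.length : Int)])) := by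
        simp [pvGaps]
      rw [List.nil_append, hg]
      have hne : pvGaps (s :: (pvPos fs (s + 1) ++ [(s + 1) + (fs.length : Int)])) ≠ [] := by
        cases h : pvPos fs (s + 1) with
        | nil => simp [pvGaps, h]
        | cons x t => simp [pvGaps]
      cases hG : pvGaps (s :: (pvPos fs (s + 1) ++ [(s + 1) + (fs.length : Int)])) with
      | nil => exact absurd hG hne
      | cons g gs =>
        rw [pvMx_cons, ← hG, ih (s + 1) s]
        simp [pvAns]

-- the flag list both ports are about
def pvFlags (words : List String) : List Bool :=
  (words.zip (PySem.List.slice words (some 1) none)).map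
    (fun p => PySem.List.pyGetD p.1.toList (-1) ' ' == PySem.List.pyGetD p.2.toList 0 ' ')

theorem pvFlags_length (words : List String) : (pvFlags words).length = words.length - 1 := by
  simp [pvFlags, PySem.List.slice_from_one, List.length_zip, List.length_tail]

theorem pvFlags_get (words : List String) (k : Nat) (hk : k < (pvFlags words).length) :
    (pvFlags words)[k] =
      (PySem.List.pyGetD ((words[k]'(by have := pvFlags_length words; omega)).toList) (-1) ' '
        == PySem.List.pyGetD ((words[k+1]'(by have := pvFlags_length words; omega)).toList) 0 ' ') := by
  simp only [pvFlags, PySem.List.slice_from_one] at hk ⊢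
  simp only [List.getElem_map, List.getElem_zip]
  rw [List.getElem_tail]

-- B's computation on an arbitrary flag list (definitionally the body of the B port)
def pvBcore (fs : List Bool) : Int :=
  let breaks : List Int :=
    [-1] ++ (((PySem.List.enumerate fs).filter (fun q => !q.2)).map (·.1)) ++ [(fs.length : Int)]
  match (breaks.zip breaks.tail).map (fun p => p.2 - p.1) with
  | [] => 0
  | d :: ds => ds.foldl max d

theorem pvBcore_eq (fs : List Bool) : pvBcore fs = pvAns fs 1 := by
  have h0 : pvBcore fs
      = pvMx (pvGaps ([-1] ++ (((PySem.List.enumerate fs).filter (fun q => !q.2)).map (·.1))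
          ++ [(fs.length : Int)])) := rfl
  have hb : ([-1] ++ (((PySem.List.enumerate fs).filter (fun q => !q.2)).map (·.1))
        ++ [(fs.length : Int)] : List Int)
      = (-1) :: (pvPos fs 0 ++ [0 + (fs.length : Int)]) := by
    rw [pvPos_eq fs 0]
    simp
  rw [h0, hb, pvB_gaps fs 0 (-1)]
  norm_num

-- B's port equals pvAns (pvFlags words) 1
theorem pvB_eq (words : List String) :
    longest_antakshari_subsequence_alt words = pvBcore (pvFlags words) := rfl

-- A's port equals pvAns (pvFlags words) 1 too
theorem pvA_eq (words : List String) :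
    longest_antakshari_subsequence words = pvAns (pvFlags words) 1 := by
  unfold longest_antakshari_subsequence
  have hl := pvFlags_length words
  cases words with
  | nil => decide
  | cons w ws =>
    simp only
    have hb : (((w :: ws).length : Int) - 1) = ((pvFlags (w :: ws)).length : Int) := by
      simp only [hl, List.length_cons]
      push_cast
      omega
    rw [hb]
    have hcong : ∀ (st : Int × Int), ∀ i ∈ PySem.List.pyRange 0 ((pvFlags (w :: ws)).length : Int) 1,
        (fun (st : Int × Int) i =>
          if PySem.List.pyGetD (PySem.List.pyGetD (w :: ws) i "").toList (-1) ' '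
             = PySem.List.pyGetD (PySem.List.pyGetD (w :: ws) (i + 1) "").toList 0 ' '
          then (st.1, st.2 + 1)
          else (max st.1 st.2, 1)) st i
        = pvStep st (PySem.List.pyGetD (pvFlags (w :: ws)) i false) := by
      intro st i hi
      rw [PySem.List.mem_pyRange_one] at hi
      obtain ⟨hi0, hiL⟩ := hi
      have hkN : i.toNat < (pvFlags (w :: ws)).length := by omega
      have hflag : PySem.List.pyGetD (pvFlags (w :: ws)) i false = (pvFlags (w :: ws))[i.toNat] :=
        PySem.List.pyGetD_eq_getElem _ _ hi0 hiL
      rw [hflag, pvFlags_get (w :: ws) i.toNat hkN]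
      have hw1 : PySem.List.pyGetD (w :: ws) i "" = (w :: ws)[i.toNat]'(by have := hl; omega) :=
        PySem.List.pyGetD_eq_getElem _ _ hi0 (by have := hl; omega)
      have hw2 : PySem.List.pyGetD (w :: ws) (i + 1) "" = (w :: ws)[(i + 1).toNat]'(by have := hl; omega) :=
        PySem.List.pyGetD_eq_getElem _ _ (by omega) (by have := hl; omega)
      have ht : (i + 1).toNat = i.toNat + 1 := by omega
      simp only [hw1, hw2, ht, pvStep, beq_iff_eq]
    rw [PySem.List.foldl_congr_mem _ _ _ _ hcong,
      PySem.List.foldl_pyRange_zero_pyGetD' (pvFlags (w :: ws)) false pvStep ((0 : Int), (1 : Int)),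
      pvA_foldl (pvFlags (w :: ws)) 0 1]
    have hpos := pvAns_pos (pvFlags (w :: ws)) 1 (by omega)
    omega

-- ===== VERDICT (by name: the statement is the Claim_ definition above) =====
theorem longest_antakshari_subsequence_spec : Claim_equal_longest_antakshari_subsequence := by
  intro words _ _
  unfold Spec_longest_antakshari_subsequence
  rw [pvA_eq, pvB_eq, pvBcore_eq]
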